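-- pv_equiv track=rewrite | github.com/Wulfic/Cicada3301 | Tools/interleave_deep.py | parse_to_runes
-- ===== SOURCE A (Python) =====
-- DIGRAPHS = ['TH', 'NG', 'EA', 'AE', 'IA', 'EO', 'OE']
--
-- def parse_to_runes(text):
--     text = text.upper().replace('/', '').replace(' ', '')
--     runes = []
--     i = 0
--     while i < len(text):
--         if i < len(text) - 1:
--             digraph = text[i:i+2]
--             if digraph in DIGRAPHS:
--                 runes.append(digraph)
--                 i += 2
--                 continue
--         if text[i].isalpha():
--             runes.append(text[i])
--         i += 1
--     return runes
-- ===== SOURCE B (Python) =====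
-- DIGRAPHS = ['TH', 'NG', 'EA', 'AE', 'IA', 'EO', 'OE']
--
-- def parse_to_runes(text):
--     s = text.upper().replace('/', '').replace(' ', '')
--     n = len(s)
--     # dynamic programming over suffixes, right to left: res[i] is the rune
--     # chain for s[i:], a shared cons cell (rune, tail) with None as the empty
--     # chain, built from res[i+1] / res[i+2].
--     res = [None] * n + [None, None]
--     for i in range(n - 1, -1, -1):
--         if s[i:i+2] in DIGRAPHS:
--             res[i] = (s[i:i+2], res[i+2])
--         elif s[i].isalpha():
--             res[i] = (s[i], res[i+1])
--         else:
--             res[i] = res[i+1]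
--     runes = []
--     cell = res[0]
--     while cell is not None:
--         runes.append(cell[0])
--         cell = cell[1]
--     return runes
-- ===== Notes on version B (the rewrite author's own statement) =====
-- stated objective: alternative
-- what changed: B replaces A's forward index-jumping while loop by bottom-up dynamic programming: it fills a table right-to-left where res[i] is the rune chain (shared cons cells) for the whole suffix s[i:], built from res[i+1]/res[i+2], and finally materialises res[0]; every index is processed once, with no jumps and no scanning accumulator.
import Mathlib
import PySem

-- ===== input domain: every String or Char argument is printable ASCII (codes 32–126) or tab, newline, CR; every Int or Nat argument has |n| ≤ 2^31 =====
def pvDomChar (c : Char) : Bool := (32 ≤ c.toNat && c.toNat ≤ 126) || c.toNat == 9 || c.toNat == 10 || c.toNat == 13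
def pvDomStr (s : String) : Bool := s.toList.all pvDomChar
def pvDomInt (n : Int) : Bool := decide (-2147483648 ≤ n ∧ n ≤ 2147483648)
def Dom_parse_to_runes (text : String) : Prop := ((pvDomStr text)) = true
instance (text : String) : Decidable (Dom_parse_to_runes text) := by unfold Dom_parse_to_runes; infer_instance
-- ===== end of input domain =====

-- B computes the rune list by bottom-up dynamic programming over suffixes (a right-to-left
-- table res[i] = answer for s[i:]) instead of A's forward index-jumping scan; objective: alternative.

-- ===== PORT A =====
def pvDIGRAPHS : List String := ["TH", "NG", "EA", "AE", "IA", "EO", "OE"]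

-- A's while loop: index scan ported as recursion on the remaining characters, accumulator = runes
def pvALoop (runes : List String) : List Char → List String
  | c1 :: c2 :: rest =>
      -- i < len(text) - 1 : at least two characters remain
      let digraph := String.ofList [c1, c2]
      if digraph ∈ pvDIGRAPHS then pvALoop (runes ++ [digraph]) rest
      else if PySem.Chars.isalpha c1 then pvALoop (runes ++ [String.ofList [c1]]) (c2 :: rest)
      else pvALoop runes (c2 :: rest)
  | [c] => if PySem.Chars.isalpha c then runes ++ [String.ofList [c]] else runes
  | [] => runes

def parse_to_runes (text : String) : List String :=
  pvALoop [] (PySem.Str.replace (PySem.Str.replace (PySem.Str.upper text) "/" "") " " "").toList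

-- ===== PORT B =====
-- Source B's backward loop: pvTable cs = [res[i], res[i+1], …] for the suffix cs = s[i:];
-- each entry is computed from the table of the shorter suffix (res[i+1] = t.getD 0,
-- res[i+2] = t.getD 1, the getD default playing the role of the two None sentinels).
-- Source B's shared cons cell (rune, tail) / None is exactly Lean's String :: tail / [].
-- s[i:i+2] is a digraph only when two characters remain (a 1-char slice is never in DIGRAPHS).
def pvTable : List Char → List (List String)
  | [] => [[]]
  | c :: rest =>
      let t := pvTable rest
      let cur :=
        match rest with
        | c2 :: _ =>
            if String.ofList [c, c2] ∈ pvDIGRAPHS then String.ofList [c, c2] :: t.getD 1 []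
            else if PySem.Chars.isalpha c then String.ofList [c] :: t.getD 0 []
            else t.getD 0 []
        | [] => if PySem.Chars.isalpha c then String.ofList [c] :: t.getD 0 [] else t.getD 0 []
      cur :: t

-- Source B's final while loop materialising the cons chain into the runes list
def pvChainToList : List String → List String
  | [] => []
  | r :: cell => r :: pvChainToList cell

def parse_to_runes_alt (text : String) : List String :=
  pvChainToList ((pvTable (PySem.Str.replace (PySem.Str.replace (PySem.Str.upper text) "/" "") " " "").toList).getD 0 [])

-- ===== PRECONDITION & SPEC =====
def Spec_parse_to_runes (text : String) (out : List String) : Prop := out = parse_to_runes_alt text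
instance (text : String) (out : List String) : Decidable (Spec_parse_to_runes text out) := by unfold Spec_parse_to_runes; infer_instance

-- ===== CLAIM (what is proved, stated in full; the proofs are below) =====
def Claim_equal_parse_to_runes : Prop := ∀ (text : String), Dom_parse_to_runes text → Spec_parse_to_runes text (parse_to_runes text)

-- ===== LEMMAS AND PROOFS =====
lemma pvChainToList_eq (l : List String) : pvChainToList l = l := by
  induction l with
  | nil => simp [pvChainToList]
  | cons r cell ih => simp [pvChainToList, ih]

lemma pvALoop_eq_table (runes : List String) (cs : List Char) :
    pvALoop runes cs = runes ++ (pvTable cs).getD 0 [] := by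
  induction runes, cs using pvALoop.induct with
  | case1 runes c1 c2 rest d hd ih =>
      have hd' : String.ofList [c1, c2] ∈ pvDIGRAPHS := hd
      have ih' : pvALoop (runes ++ [String.ofList [c1, c2]]) rest =
          runes ++ [String.ofList [c1, c2]] ++ (pvTable rest).getD 0 [] := ih
      simp [pvALoop, pvTable, hd', ih']
  | case2 runes c1 c2 rest d hd ha ih =>
      have hd' : String.ofList [c1, c2] ∉ pvDIGRAPHS := hd
      have step : pvALoop runes (c1 :: c2 :: rest) = pvALoop (runes ++ [String.ofList [c1]]) (c2 :: rest) := by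
        simp [pvALoop, hd', ha]
      rw [step, ih]
      simp [pvTable, hd', ha]
  | case3 runes c1 c2 rest d hd ha ih =>
      have hd' : String.ofList [c1, c2] ∉ pvDIGRAPHS := hd
      have step : pvALoop runes (c1 :: c2 :: rest) = pvALoop runes (c2 :: rest) := by
        simp [pvALoop, hd', ha]
      rw [step, ih]
      simp [pvTable, hd', ha]
  | case4 runes c ha =>
      simp [pvALoop, pvTable, ha]
  | case5 runes c ha =>
      simp [pvALoop, pvTable, ha]
  | case6 runes =>
      simp [pvALoop, pvTable]

-- ===== VERDICT (by name: the statement is the Claim_ definition above) =====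
theorem parse_to_runes_spec : Claim_equal_parse_to_runes := by
  intro text _
  unfold Spec_parse_to_runes parse_to_runes parse_to_runes_alt
  rw [pvChainToList_eq]
  simpa using pvALoop_eq_table [] _
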